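-- pv_equiv track=rewrite | github.com/youngs75/ax-coding-agent | coding_agent/tools/task_tool.py | _sanitize_verifier_text
-- ===== SOURCE A (Python) =====
-- _VERIFIER_SUMMARY_HEAD_LIMIT = 400
--
-- _VERIFIER_FORBIDDEN_HEADINGS = (
--     "## Error Report",
--     "## Fixer Instructions",
--     "## Success Criteria",
--     "## Fix Plan",
--     "## Recommendations",
-- )
--
-- def _sanitize_verifier_text(text: str) -> str:
--     """Drop instruction-style markdown sections that would steer the top-level
--     LLM into continuation mode (pasting "## Fixer Instructions" verbatim
--     instead of calling ``task(fixer)``).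
--
--     We keep only the prefix up to the first forbidden heading, then truncate
--     to ``_VERIFIER_SUMMARY_HEAD_LIMIT`` chars. The structured evidence the
--     orchestrator actually needs lives in the execute(command, result) pairs
--     appended separately.
--     """
--     if not text:
--         return ""
--     cut = len(text)
--     for heading in _VERIFIER_FORBIDDEN_HEADINGS:
--         idx = text.find(heading)
--         if idx != -1 and idx < cut:
--             cut = idx
--     head = text[:cut].rstrip()
--     if len(head) > _VERIFIER_SUMMARY_HEAD_LIMIT:
--         head = head[:_VERIFIER_SUMMARY_HEAD_LIMIT].rstrip() + " … (truncated)"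
--     return head
-- ===== SOURCE B (Python) =====
-- _VERIFIER_SUMMARY_HEAD_LIMIT = 400
--
-- _VERIFIER_FORBIDDEN_HEADINGS = (
--     "## Error Report",
--     "## Fixer Instructions",
--     "## Success Criteria",
--     "## Fix Plan",
--     "## Recommendations",
-- )
--
--
-- def _sanitize_verifier_text(text: str) -> str:
--     """Single left-to-right scan: stop at the first position where any
--     forbidden heading starts, instead of one full find() pass per heading
--     with a running minimum."""
--     if not text:
--         return ""
--     cut = len(text)
--     for i in range(len(text)):
--         if any(text.startswith(h, i) for h in _VERIFIER_FORBIDDEN_HEADINGS):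
--             cut = i
--             break
--     head = text[:cut].rstrip()
--     if len(head) > _VERIFIER_SUMMARY_HEAD_LIMIT:
--         head = head[:_VERIFIER_SUMMARY_HEAD_LIMIT].rstrip() + " … (truncated)"
--     return head
-- ===== Notes on version B (the rewrite author's own statement) =====
-- stated objective: alternative
-- what changed: A runs one full str.find pass per forbidden heading and keeps a running-minimum index; B makes a single left-to-right scan over positions, stopping at the first position where any forbidden heading starts (the regex-alternation strategy, hand-rolled since A imports no modules), then applies the identical rstrip/limit/suffix tail.
import Mathlib
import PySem

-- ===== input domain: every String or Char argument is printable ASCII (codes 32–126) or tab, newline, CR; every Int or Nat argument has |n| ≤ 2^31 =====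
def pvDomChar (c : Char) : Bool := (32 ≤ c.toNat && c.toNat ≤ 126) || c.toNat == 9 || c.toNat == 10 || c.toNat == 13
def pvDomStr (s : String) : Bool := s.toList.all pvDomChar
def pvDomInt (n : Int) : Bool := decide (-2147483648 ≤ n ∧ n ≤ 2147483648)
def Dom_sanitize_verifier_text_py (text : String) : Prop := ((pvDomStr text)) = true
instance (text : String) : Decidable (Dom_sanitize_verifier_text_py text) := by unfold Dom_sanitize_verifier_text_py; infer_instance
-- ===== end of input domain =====

-- B replaces A's per-heading find() passes with a running minimum by one left-to-right
-- scan stopping at the first position where any forbidden heading starts (objective: alternative).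

-- the five forbidden headings, as code-point lists
def pvHeadings : List (List Char) :=
  ["## Error Report".toList, "## Fixer Instructions".toList, "## Success Criteria".toList,
   "## Fix Plan".toList, "## Recommendations".toList]

-- ===== PORT A =====
def sanitize_verifier_text_py (text : String) : String :=
  let s := text.toList
  if s = [] then "" else
  let cut : Int := pvHeadings.foldl
    (fun cut heading =>
      let idx := PySem.Chars.find s heading
      if idx ≠ -1 ∧ idx < cut then idx else cut)
    (PySem.Chars.len s)
  let head := PySem.Chars.rstrip (PySem.Chars.slice s none (some cut))
  let head := if PySem.Chars.len head > 400 then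
      PySem.Chars.rstrip (PySem.Chars.slice head none (some 400)) ++ " … (truncated)".toList
    else head
  String.ofList head

-- ===== PORT B =====
-- B's scan: index of the first position where some forbidden heading starts (length if none)
def pvScan : List Char → Nat
  | [] => 0
  | c :: rest =>
    if pvHeadings.any (fun h => PySem.Chars.startswith (c :: rest) h) then 0
    else 1 + pvScan rest

def sanitize_verifier_text_py_alt (text : String) : String :=
  let s := text.toList
  if s = [] then "" else
  let cut : Nat := pvScan s
  let head := PySem.Chars.rstrip (s.take cut)
  let head := if PySem.Chars.len head > 400 then
      PySem.Chars.rstrip (head.take 400) ++ " … (truncated)".toList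
    else head
  String.ofList head

-- ===== PRECONDITION & SPEC =====
def Spec_sanitize_verifier_text_py (text : String) (out : String) : Prop := out = sanitize_verifier_text_py_alt text
instance (text : String) (out : String) : Decidable (Spec_sanitize_verifier_text_py text out) := by unfold Spec_sanitize_verifier_text_py; infer_instance

-- ===== CLAIM (what is proved, stated in full; the proofs are below) =====
def Claim_equal_sanitize_verifier_text_py : Prop := ∀ (text : String), Dom_sanitize_verifier_text_py text → Spec_sanitize_verifier_text_py text (sanitize_verifier_text_py text)

-- ===== LEMMAS AND PROOFS =====

-- "some forbidden heading starts at position i of s"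
def pvMatch (s : List Char) (i : Nat) : Prop := ∃ h ∈ pvHeadings, h <+: s.drop i

theorem pvScan_le (s : List Char) : pvScan s ≤ s.length := by
  induction s with
  | nil => simp [pvScan]
  | cons c rest ih =>
    simp only [pvScan, List.length_cons]
    split <;> omega

theorem pvScan_no_match (s : List Char) (i : Nat) (hi : i < pvScan s) : ¬ pvMatch s i := by
  induction s generalizing i with
  | nil => simp [pvScan] at hi
  | cons c rest ih =>
    simp only [pvScan] at hi
    split at hi
    · omega
    · rename_i hno
      cases i with
      | zero =>
        intro hm
        obtain ⟨h, hh, hpre⟩ := hm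
        exact hno (List.any_eq_true.mpr
          ⟨h, hh, (PySem.Chars.startswith_iff (c :: rest) h).mpr (by simpa using hpre)⟩)
      | succ j =>
        intro hm
        obtain ⟨h, hh, hpre⟩ := hm
        exact ih j (by omega) ⟨h, hh, by simpa using hpre⟩

theorem pvScan_hit (s : List Char) : pvScan s = s.length ∨ pvMatch s (pvScan s) := by
  induction s with
  | nil => left; simp [pvScan]
  | cons c rest ih =>
    simp only [pvScan]
    split
    · rename_i hyes
      obtain ⟨h, hh, hsw⟩ := List.any_eq_true.mp hyes
      right
      exact ⟨h, hh, by simpa using (PySem.Chars.startswith_iff (c :: rest) h).mp hsw⟩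
    · rcases ih with h | h
      · left; simp only [List.length_cons]; omega
      · right
        obtain ⟨g, hg, hpre⟩ := h
        exact ⟨g, hg, by rw [Nat.add_comm, List.drop_succ_cons]; exact hpre⟩

-- A's fold computes the minimum of the accumulator and every successful find
theorem pvFold_spec (s : List Char) (H : List (List Char)) (a c : Int)
    (hc : c = H.foldl (fun cut heading =>
      let idx := PySem.Chars.find s heading
      if idx ≠ -1 ∧ idx < cut then idx else cut) a) :
    (c = a ∨ ∃ h ∈ H, c = PySem.Chars.find s h ∧ PySem.Chars.find s h ≠ -1) ∧
    c ≤ a ∧ ∀ h ∈ H, PySem.Chars.find s h ≠ -1 → c ≤ PySem.Chars.find s h := by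
  induction H generalizing a with
  | nil => simp at hc; simp [hc]
  | cons h0 H ih =>
    simp only [List.foldl_cons] at hc
    by_cases hcond : PySem.Chars.find s h0 ≠ -1 ∧ PySem.Chars.find s h0 < a
    · rw [if_pos hcond] at hc
      obtain ⟨h1, h2, h3⟩ := ih (PySem.Chars.find s h0) hc
      refine ⟨?_, by omega, ?_⟩
      · rcases h1 with h1 | ⟨g, hg, hgc⟩
        · exact Or.inr ⟨h0, by simp, h1, hcond.1⟩
        · exact Or.inr ⟨g, by simp [hg], hgc⟩
      · intro g hg hfg
        rcases List.mem_cons.mp hg with rfl | hg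
        · omega
        · exact h3 g hg hfg
    · rw [if_neg hcond] at hc
      obtain ⟨h1, h2, h3⟩ := ih a hc
      refine ⟨?_, h2, ?_⟩
      · rcases h1 with h1 | ⟨g, hg, hgc⟩
        · exact Or.inl h1
        · exact Or.inr ⟨g, by simp [hg], hgc⟩
      · intro g hg hfg
        rcases List.mem_cons.mp hg with rfl | hg
        · have : ¬ PySem.Chars.find s g < a := fun hlt => hcond ⟨hfg, hlt⟩
          omega
        · exact h3 g hg hfg

theorem pvCut_eq (s : List Char) :
    pvHeadings.foldl (fun cut heading =>
      let idx := PySem.Chars.find s heading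
      if idx ≠ -1 ∧ idx < cut then idx else cut) (PySem.Chars.len s)
    = (pvScan s : Int) := by
  obtain ⟨h1, h2, h3⟩ := pvFold_spec s pvHeadings (PySem.Chars.len s) _ rfl
  set c := pvHeadings.foldl (fun cut heading =>
      let idx := PySem.Chars.find s heading
      if idx ≠ -1 ∧ idx < cut then idx else cut) (PySem.Chars.len s) with hc
  have hlen : PySem.Chars.len s = (s.length : Int) := PySem.Chars.len_eq s
  have hc0 : 0 ≤ c := by
    rcases h1 with h1 | ⟨g, _, hgc, hgne⟩
    · rw [h1, hlen]; positivity
    · have := PySem.Chars.neg_one_le_find s g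
      omega
  have hcle : c ≤ (s.length : Int) := by rw [hlen] at h2; exact h2
  -- no heading matches strictly below c
  have hnomatch : ∀ i : Nat, (i : Int) < c → ¬ pvMatch s i := by
    intro i hi hm
    obtain ⟨g, hg, hpre⟩ := hm
    by_cases hne : PySem.Chars.find s g = -1
    · exact ((PySem.Chars.find_eq_neg_one_iff s g).mp hne)
        (List.infix_iff_prefix_suffix.mpr ⟨s.drop i, hpre, by simpa using List.drop_suffix i s⟩)
    · have hle := h3 g hg hne
      have hfnn : 0 ≤ PySem.Chars.find s g := by
        have := PySem.Chars.neg_one_le_find s g; omega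
      obtain ⟨_, hfirst⟩ := PySem.Chars.find_spec (s := s) (sub := g) hfnn
      exact hfirst i (by omega) hpre
  -- a heading matches at c, unless c = length
  have hhit : c = (s.length : Int) ∨ pvMatch s c.toNat := by
    rcases h1 with h1 | ⟨g, hg, hgc, hgne⟩
    · left; rw [h1, hlen]
    · right
      have hfnn : 0 ≤ PySem.Chars.find s g := by
        have := PySem.Chars.neg_one_le_find s g; omega
      obtain ⟨hpre, _⟩ := PySem.Chars.find_spec (s := s) (sub := g) hfnn
      exact ⟨g, hg, by rw [hgc]; exact hpre⟩
  -- uniqueness against pvScan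
  have hsle := pvScan_le s
  rcases lt_trichotomy c ((pvScan s : Nat) : Int) with h | h | h
  · exfalso
    rcases hhit with he | hm
    · omega
    · exact pvScan_no_match s c.toNat (by omega) hm
  · exact h
  · exfalso
    rcases pvScan_hit s with he | hm
    · omega
    · exact hnomatch (pvScan s) h hm

-- ===== VERDICT (by name: the statement is the Claim_ definition above) =====
theorem sanitize_verifier_text_py_spec : Claim_equal_sanitize_verifier_text_py := by
  intro text _
  unfold Spec_sanitize_verifier_text_py sanitize_verifier_text_py sanitize_verifier_text_py_alt
  by_cases h : text.toList = []
  · simp [h]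
  · simp only [h, pvCut_eq]
    rw [show PySem.Chars.slice text.toList none (some ((pvScan text.toList : Nat) : Int))
          = text.toList.take (pvScan text.toList) by
        simp [PySem.Chars.slice_eq_listSlice, PySem.List.slice_to_natCast]]
    rw [show ∀ (l : List Char), PySem.Chars.slice l none (some (400 : Int)) = l.take 400 by
        intro l
        simpa using PySem.List.slice_to_natCast (xs := l) (b := 400)]
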